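-- pv_equiv track=rewrite | github.com/oizgagin/adventofcode2020 | 24/1.py | parse
-- ===== SOURCE A (Python) =====
-- def parse(input):
--     dirs = []
--     for line in input.splitlines():
--         dir = []
--         while line:
--             for direction in ['e', 'se', 'sw', 'w', 'nw', 'ne']:
--                 if line.startswith(direction):
--                     dir.append(direction)
--                     line = line[len(direction):]
--                     break
--         dirs.append(dir)
--     return dirs
-- ===== SOURCE B (Python) =====
-- def parse(input):
--     dirs = []
--     for line in input.splitlines():
--         toks = []
--         i = 0
--         n = len(line)
--         while i < n:
--             c = line[i]
--             if c == 'e' or c == 'w':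
--                 toks.append(c)
--                 i += 1
--             elif (c == 's' or c == 'n') and i + 1 < n and (line[i + 1] == 'e' or line[i + 1] == 'w'):
--                 toks.append(line[i:i + 2])
--                 i += 2
--             else:
--                 raise ValueError('invalid direction at index %d' % i)
--         dirs.append(toks)
--     return dirs
-- ===== Notes on version B (the rewrite author's own statement) =====
-- stated objective: alternative
-- what changed: B replaces A's inner scan over six candidate prefixes with repeated re-slicing of the remaining line by a single index-pointer pass that dispatches on one or two characters per token and never copies the remainder.
import Mathlib
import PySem

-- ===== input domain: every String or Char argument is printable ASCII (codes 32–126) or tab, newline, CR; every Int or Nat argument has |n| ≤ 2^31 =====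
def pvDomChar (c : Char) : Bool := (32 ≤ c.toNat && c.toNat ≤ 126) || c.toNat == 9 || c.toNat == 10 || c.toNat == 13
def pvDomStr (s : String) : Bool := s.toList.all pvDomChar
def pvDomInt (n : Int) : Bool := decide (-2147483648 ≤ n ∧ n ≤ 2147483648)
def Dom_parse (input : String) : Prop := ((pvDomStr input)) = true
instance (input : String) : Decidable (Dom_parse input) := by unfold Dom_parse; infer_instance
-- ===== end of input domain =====

-- One line: B tokenises each line with a single index-pointer pass (no re-slicing of the
-- remainder); A's inner `while` loops forever on a line that is not a sequence of hex
-- direction tokens, B raises ValueError there — those inputs are outside Pre_parse.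

-- ===== PORT A =====
-- A's `while line:` loop; `for direction in [...]` with `startswith`/`line[len(direction):]`
-- is transliterated as the same ordered chain of prefix tests over the line's characters.
-- On a line where no candidate matches, Python A never terminates; the fuel guard (one unit
-- per loop iteration, initial fuel length+1 suffices since every match consumes a character)
-- only makes the function total and is never reached under Pre_parse.
def parseLineA : Nat → List Char → List String → List String
  | 0, _, dir => dir
  | fuel + 1, line, dir =>
    if line = [] then dir
    else if PySem.Chars.startswith line ['e'] then
      parseLineA fuel (PySem.List.slice line (some 1) none) (dir ++ ["e"])
    else if PySem.Chars.startswith line ['s', 'e'] then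
      parseLineA fuel (PySem.List.slice line (some 2) none) (dir ++ ["se"])
    else if PySem.Chars.startswith line ['s', 'w'] then
      parseLineA fuel (PySem.List.slice line (some 2) none) (dir ++ ["sw"])
    else if PySem.Chars.startswith line ['w'] then
      parseLineA fuel (PySem.List.slice line (some 1) none) (dir ++ ["w"])
    else if PySem.Chars.startswith line ['n', 'w'] then
      parseLineA fuel (PySem.List.slice line (some 2) none) (dir ++ ["nw"])
    else if PySem.Chars.startswith line ['n', 'e'] then
      parseLineA fuel (PySem.List.slice line (some 2) none) (dir ++ ["ne"])
    else
      parseLineA fuel line dir  -- Python re-enters the while loop unchanged: divergence; fuel runs out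

def parse (input : String) : List (List String) :=
  (PySem.Str.splitlines input).foldl
    (fun dirs line => dirs ++ [parseLineA (line.toList.length + 1) line.toList []]) []

-- ===== PORT B =====
-- B's index-pointer scan: dispatch on one ('e'/'w') or two ('s'/'n' then 'e'/'w') characters;
-- moving the pointer past a token = structural recursion on the remaining suffix.
-- Where Source B raises ValueError (invalid character), the port stops (outside Pre_parse).
def scanLineB : List Char → List String
  | [] => []
  | 'e' :: rest => "e" :: scanLineB rest
  | 'w' :: rest => "w" :: scanLineB rest
  | 's' :: 'e' :: rest => "se" :: scanLineB rest
  | 's' :: 'w' :: rest => "sw" :: scanLineB rest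
  | 'n' :: 'e' :: rest => "ne" :: scanLineB rest
  | 'n' :: 'w' :: rest => "nw" :: scanLineB rest
  | _ => []  -- Source B raises ValueError here

def parse_alt (input : String) : List (List String) :=
  (PySem.Str.splitlines input).map (fun line => scanLineB line.toList)

-- ===== PRECONDITION & SPEC =====
-- A valid line is a sequence of hex-direction tokens e/w/se/sw/ne/nw.
def validLine : List Char → Bool
  | [] => true
  | 'e' :: r => validLine r
  | 'w' :: r => validLine r
  | 's' :: c :: r => (c == 'e' || c == 'w') && validLine r
  | 'n' :: c :: r => (c == 'e' || c == 'w') && validLine r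
  | _ => false

-- Pre_ excludes inputs with an invalid line: there A's inner while-loop never terminates
-- (it returns no value), and B raises ValueError.
def Pre_parse (input : String) : Prop :=
  (PySem.Str.splitlines input).all (fun line => validLine line.toList) = true
instance (input : String) : Decidable (Pre_parse input) := by unfold Pre_parse; infer_instance

def pvWitness_parse : String := "esenee\nnwwswee"

def Spec_parse (input : String) (out : List (List String)) : Prop := out = parse_alt input
instance (input : String) (out : List (List String)) : Decidable (Spec_parse input out) := by unfold Spec_parse; infer_instance

-- ===== CLAIM (what is proved, stated in full; the proofs are below) =====
def Claim_equal_parse : Prop := ∀ (input : String), Dom_parse input → Pre_parse input → Spec_parse input (parse input)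

-- ===== LEMMAS AND PROOFS =====

lemma slice_two (c c2 : Char) (r : List Char) :
    PySem.List.slice (c :: c2 :: r) (some 2) none = r := by
  rw [show ((2:Int)) = ((2:Nat):Int) by norm_num, PySem.List.slice_from_natCast]
  rfl

lemma parseLineA_eq (line : List Char) (hval : validLine line = true) :
    ∀ fuel, line.length < fuel → ∀ acc, parseLineA fuel line acc = acc ++ scanLineB line := by
  fun_induction validLine line with
  | case1 =>
    intro fuel hfuel acc
    cases fuel with
    | zero => omega
    | succ m => simp [parseLineA, scanLineB]
  | case2 r ih =>
    intro fuel hfuel acc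
    cases fuel with
    | zero => omega
    | succ m =>
      try simp only [validLine] at hval
      simp only [parseLineA, PySem.Chars.startswith, List.isPrefixOf, PySem.List.slice_from_one]
      simp only [reduceCtorEq, beq_self_eq_true, if_true, if_false, List.tail_cons,
        Char.reduceBEq, Bool.false_and, Bool.and_true, Bool.and_self]
      rw [ih hval m (by simp at hfuel; omega)]
      simp [scanLineB]
  | case3 r ih =>
    intro fuel hfuel acc
    cases fuel with
    | zero => omega
    | succ m =>
      try simp only [validLine] at hval
      simp only [parseLineA, PySem.Chars.startswith, List.isPrefixOf, PySem.List.slice_from_one]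
      simp only [reduceCtorEq, beq_self_eq_true, if_true, if_false, List.tail_cons,
        Char.reduceBEq, Bool.false_and, Bool.and_true, Bool.and_self]
      rw [ih hval m (by simp at hfuel; omega)]
      simp [scanLineB]
  | case4 c r ih =>
    intro fuel hfuel acc
    rcases (by simpa [validLine] using hval : (c = 'e' ∨ c = 'w') ∧ validLine r = true) with ⟨hc, hr⟩
    rcases hc with h | h <;> subst h <;>
    · cases fuel with
      | zero => omega
      | succ m =>
        simp only [parseLineA, PySem.Chars.startswith, List.isPrefixOf, slice_two]
        simp only [reduceCtorEq, beq_self_eq_true, Bool.and_self, if_true, if_false,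
          Char.reduceBEq, Bool.true_and, Bool.and_true]
        rw [ih hr m (by simp at hfuel; omega)]
        simp [scanLineB]
  | case5 c r ih =>
    intro fuel hfuel acc
    rcases (by simpa [validLine] using hval : (c = 'e' ∨ c = 'w') ∧ validLine r = true) with ⟨hc, hr⟩
    rcases hc with h | h <;> subst h <;>
    · cases fuel with
      | zero => omega
      | succ m =>
        simp only [parseLineA, PySem.Chars.startswith, List.isPrefixOf, slice_two]
        simp only [reduceCtorEq, beq_self_eq_true, Bool.and_self, if_true, if_false,
          Char.reduceBEq, Bool.true_and, Bool.and_true]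
        rw [ih hr m (by simp at hfuel; omega)]
        simp [scanLineB]
  | case6 l h1 h2 h3 h4 h5 =>
    simp at hval

-- ===== VERDICT (by name: the statement is the Claim_ definition above) =====
theorem parse_spec : Claim_equal_parse := by
  intro input _ hpre
  unfold Spec_parse parse parse_alt
  rw [PySem.List.foldl_append_singleton_eq_map]
  apply List.map_congr_left
  intro line hmem
  have hv : validLine line.toList = true := by
    rw [Pre_parse, List.all_eq_true] at hpre
    exact hpre line hmem
  exact parseLineA_eq line.toList hv _ (Nat.lt_succ_self _) []
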